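-- pv_equiv track=rewrite | github.com/CorneHQ/AoC-2021 | day3/main.py | calculateEpsilon
-- ===== SOURCE A (Python) =====
-- from typing import List
--
-- def calculateEpsilon(binaryList: List[List[int]]) -> int:
--     epsilonBinary = ""
--     for i in range(len(binaryList[0])):
--         countZero = 0
--         countOne = 0
--         for element in binaryList:
--             if element[i] == 0:
--                 countZero += 1
--             else:
--                 countOne += 1
--         epsilonBinary += "1" if countOne < countZero else "0"
--     return binaryToInt(epsilonBinary)
--
-- def binaryToInt(binary: str) -> int:
--     return int(binary, 2)
-- ===== SOURCE B (Python) =====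
-- def calculateEpsilon(binaryList):
--     width = len(binaryList[0])
--     ones = [0] * width
--     for row in binaryList:
--         ones = [ones[j] + (1 if row[j] != 0 else 0) for j in range(width)]
--     n = len(binaryList)
--     epsilon = 0
--     for c in ones:
--         epsilon = 2 * epsilon + (1 if 2 * c < n else 0)
--     return epsilon
-- ===== Notes on version B (the rewrite author's own statement) =====
-- stated objective: alternative
-- what changed: B replaces A's per-column rescans of the whole matrix and its intermediate binary string fed to int(.,2) by one pass over the rows maintaining a per-column ones-count table, then a direct integer accumulation epsilon = 2*epsilon + bit over the columns (tie still gives bit 0).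
import Mathlib
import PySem

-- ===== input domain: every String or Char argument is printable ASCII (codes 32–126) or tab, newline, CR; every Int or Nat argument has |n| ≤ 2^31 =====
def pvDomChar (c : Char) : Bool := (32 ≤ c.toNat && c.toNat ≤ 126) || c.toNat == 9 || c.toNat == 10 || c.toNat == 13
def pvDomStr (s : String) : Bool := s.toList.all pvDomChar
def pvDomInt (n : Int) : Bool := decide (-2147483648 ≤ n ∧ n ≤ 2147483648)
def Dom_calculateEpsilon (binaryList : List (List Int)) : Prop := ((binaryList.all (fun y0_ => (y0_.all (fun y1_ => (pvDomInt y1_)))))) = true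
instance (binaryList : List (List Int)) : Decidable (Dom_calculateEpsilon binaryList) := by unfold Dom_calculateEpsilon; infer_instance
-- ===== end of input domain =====

-- B replaces A's per-column rescans and intermediate binary string with one row pass
-- building a per-column ones-count table, then direct integer accumulation (alternative decomposition).


-- ===== PORT A =====
-- hand port of int(binary, 2): exact for nonempty strings of '0'/'1' characters,
-- which is all that A's caller ever passes under Pre_
def binaryToInt (binary : String) : Int :=
  binary.toList.foldl (fun a c => a * 2 + (if c = '1' then 1 else 0)) 0

-- binaryList[0] is ported as headD []; Pre_ guarantees the list is nonempty,
-- and element[i] as getD i 0; Pre_ guarantees i is in range for every row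
def calculateEpsilon (binaryList : List (List Int)) : Int :=
  let epsilonBinary :=
    (List.range ((binaryList.headD []).length)).foldl
      (fun s i =>
        let counts := binaryList.foldl
          (fun (p : Int × Int) element =>
            if element.getD i 0 = 0 then (p.1 + 1, p.2) else (p.1, p.2 + 1))
          (0, 0)
        s ++ (if counts.2 < counts.1 then "1" else "0"))
      ""
  binaryToInt epsilonBinary

-- ===== PORT B =====
def calculateEpsilon_alt (binaryList : List (List Int)) : Int :=
  let width := (binaryList.headD []).length
  let ones := binaryList.foldl
    (fun ones row =>
      (List.range width).map (fun j => ones.getD j 0 + (if row.getD j 0 ≠ 0 then 1 else 0)))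
    (List.replicate width (0 : Int))
  let n : Int := binaryList.length
  ones.foldl (fun e c => 2 * e + (if 2 * c < n then 1 else 0)) 0

-- ===== PRECONDITION & SPEC =====
-- Pre_ excludes exactly the inputs where the Python A raises: the empty list (IndexError on
-- binaryList[0]), an empty first row (ValueError from int('', 2)), and rows shorter than the
-- first row (IndexError on element[i]).
def Pre_calculateEpsilon (binaryList : List (List Int)) : Prop :=
  binaryList ≠ [] ∧ 0 < (binaryList.headD []).length ∧
    ∀ row ∈ binaryList, (binaryList.headD []).length ≤ row.length
instance (binaryList : List (List Int)) : Decidable (Pre_calculateEpsilon binaryList) := by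
  unfold Pre_calculateEpsilon; infer_instance
def pvWitness_calculateEpsilon : List (List Int) := [[1, 0], [0, 0], [1, 1]]

def Spec_calculateEpsilon (binaryList : List (List Int)) (out : Int) : Prop := out = calculateEpsilon_alt binaryList
instance (binaryList : List (List Int)) (out : Int) : Decidable (Spec_calculateEpsilon binaryList out) := by unfold Spec_calculateEpsilon; infer_instance

-- ===== CLAIM (what is proved, stated in full; the proofs are below) =====
def Claim_equal_calculateEpsilon : Prop := ∀ (binaryList : List (List Int)), Dom_calculateEpsilon binaryList → Pre_calculateEpsilon binaryList → Spec_calculateEpsilon binaryList (calculateEpsilon binaryList)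

-- ===== LEMMAS AND PROOFS =====

-- number of rows whose j-th entry (getD default 0) is nonzero
def cntOnes : List (List Int) → Nat → Int
  | [], _ => 0
  | r :: rs, j => (if r.getD j 0 ≠ 0 then 1 else 0) + cntOnes rs j

-- A's inner loop: the (zeros, ones) pair fold in closed form
theorem pairfold_eq (rows : List (List Int)) (i : Nat) (a b : Int) :
    rows.foldl
      (fun (p : Int × Int) element =>
        if element.getD i 0 = 0 then (p.1 + 1, p.2) else (p.1, p.2 + 1))
      (a, b)
      = (a + ((rows.length : Int) - cntOnes rows i), b + cntOnes rows i) := by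
  induction rows generalizing a b with
  | nil => simp [cntOnes]
  | cons r rs ih =>
    simp only [List.foldl_cons, cntOnes, List.length_cons]
    by_cases h : r.getD i 0 = 0
    · rw [if_pos h, ih]
      simp only [h, ne_eq, not_true_eq_false, if_false]
      simp only [Prod.mk.injEq]
      constructor <;> (push_cast; ring)
    · rw [if_neg h, ih]
      simp only [ne_eq, h, not_false_eq_true, if_true]
      simp only [Prod.mk.injEq]
      constructor <;> (push_cast; ring)

theorem getD_map_range (w j : Nat) (f : Nat → Int) (h : j < w) :
    ((List.range w).map f).getD j 0 = f j := by
  rw [List.getD_eq_getElem?_getD, List.getElem?_map, List.getElem?_range h]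
  rfl

-- B's row pass: the ones-table after folding the rows, in closed form
theorem ones_fold_eq (w : Nat) (rows : List (List Int)) (f : Nat → Int) :
    rows.foldl
      (fun ones row =>
        (List.range w).map (fun j => ones.getD j 0 + (if row.getD j 0 ≠ 0 then 1 else 0)))
      ((List.range w).map f)
      = (List.range w).map (fun j => f j + cntOnes rows j) := by
  induction rows generalizing f with
  | nil => simp [cntOnes]
  | cons r rs ih =>
    simp only [List.foldl_cons]
    have hstep :
        (List.range w).map
            (fun j => ((List.range w).map f).getD j 0 + (if r.getD j 0 ≠ 0 then 1 else 0))
          = (List.range w).map (fun j => f j + (if r.getD j 0 ≠ 0 then 1 else 0)) := by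
      apply List.map_congr_left
      intro j hj
      rw [getD_map_range w j f (List.mem_range.mp hj)]
    rw [hstep, ih]
    apply List.map_congr_left
    intro j _
    simp [cntOnes]; ring

theorem replicate_eq_map_range (w : Nat) :
    List.replicate w (0 : Int) = (List.range w).map (fun _ => 0) := by
  simp [List.map_const', List.length_range]

theorem binaryToInt_append_bit (s : String) (c : Prop) [Decidable c] :
    binaryToInt (s ++ (if c then "1" else "0"))
      = binaryToInt s * 2 + (if c then 1 else 0) := by
  by_cases h : c <;>
    simp [h, binaryToInt, List.foldl_append]

-- A's outer loop: string accumulation + binaryToInt equals an integer fold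
theorem strfold_eq (l : List Nat) (p : Nat → Prop) [DecidablePred p] (s : String) :
    binaryToInt (l.foldl (fun s i => s ++ (if p i then "1" else "0")) s)
      = l.foldl (fun a i => a * 2 + (if p i then 1 else 0)) (binaryToInt s) := by
  induction l generalizing s with
  | nil => simp
  | cons x xs ih =>
    simp only [List.foldl_cons, ih, binaryToInt_append_bit]

theorem main_eq (binaryList : List (List Int)) :
    calculateEpsilon binaryList = calculateEpsilon_alt binaryList := by
  unfold calculateEpsilon calculateEpsilon_alt
  set w := (binaryList.headD []).length with hw
  set n : Int := (binaryList.length : Int) with hn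
  simp only []
  rw [strfold_eq (List.range w)
      (p := fun i =>
        (binaryList.foldl
          (fun (p : Int × Int) element =>
            if element.getD i 0 = 0 then (p.1 + 1, p.2) else (p.1, p.2 + 1))
          (0, 0)).2
        < (binaryList.foldl
          (fun (p : Int × Int) element =>
            if element.getD i 0 = 0 then (p.1 + 1, p.2) else (p.1, p.2 + 1))
          (0, 0)).1) ""]
  rw [replicate_eq_map_range, ones_fold_eq, List.foldl_map]
  have h0 : binaryToInt "" = 0 := by decide
  rw [h0]
  apply PySem.List.foldl_congr_mem
  intro acc i _
  rw [pairfold_eq]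
  simp only [zero_add]
  have hiff : (cntOnes binaryList i < n - cntOnes binaryList i) ↔ (2 * cntOnes binaryList i < n) := by
    omega
  by_cases h : cntOnes binaryList i < n - cntOnes binaryList i
  · rw [if_pos h, if_pos (hiff.mp h)]; ring
  · rw [if_neg h, if_neg (fun hh => h (hiff.mpr hh))]; ring

-- ===== VERDICT (by name: the statement is the Claim_ definition above) =====
theorem calculateEpsilon_spec : Claim_equal_calculateEpsilon := by
  intro binaryList _ _
  unfold Spec_calculateEpsilon
  exact main_eq binaryList
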